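-- pv_equiv track=rewrite | github.com/jaeminjeon123/backjoon | 백준/Silver/16564. 히오스 프로게이머/히오스 프로게이머.py | hero
-- ===== SOURCE A (Python) =====
-- def hero(a, b, level):
--     level.sort()
--
--
--     left, right = level[0], level[0] + b
--
--     while left <= right:
--         mid = (left + right) // 2
--         count = 0
--
--         for l in level:
--             if l < mid:
--                 count += mid - l
--
--         if count <= b:
--             left = mid + 1
--         else:
--             right = mid - 1
--
--     return right
-- ===== SOURCE B (Python) =====
-- def hero(a, b, level):
--     # Return-value equivalent to A; A sorts `level` in place, B leaves it untouched.
--     s = sorted(level)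
--     n = len(s)
--     prefix = [0]
--     acc = 0
--     for x in s:
--         acc += x
--         prefix.append(acc)
--
--     def cost(m):
--         # number of elements < m, by binary search on the sorted list
--         lo, hi = 0, n
--         while lo < hi:
--             md = (lo + hi) // 2
--             if s[md] < m:
--                 lo = md + 1
--             else:
--                 hi = md
--         return m * lo - prefix[lo]
--
--     left, right = s[0], s[0] + b
--     while left <= right:
--         mid = (left + right) // 2
--         if cost(mid) <= b:
--             left = mid + 1
--         else:
--             right = mid - 1
--     return right
-- ===== Notes on version B (the rewrite author's own statement) =====
-- stated objective: faster
-- what changed: The O(n) cost scan inside the outer binary search is replaced by prefix sums computed once plus an inner binary search (bisect) on the sorted list, making each cost evaluation O(log n); B also leaves the input list unmutated (A sorts it in place).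
import Mathlib
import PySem

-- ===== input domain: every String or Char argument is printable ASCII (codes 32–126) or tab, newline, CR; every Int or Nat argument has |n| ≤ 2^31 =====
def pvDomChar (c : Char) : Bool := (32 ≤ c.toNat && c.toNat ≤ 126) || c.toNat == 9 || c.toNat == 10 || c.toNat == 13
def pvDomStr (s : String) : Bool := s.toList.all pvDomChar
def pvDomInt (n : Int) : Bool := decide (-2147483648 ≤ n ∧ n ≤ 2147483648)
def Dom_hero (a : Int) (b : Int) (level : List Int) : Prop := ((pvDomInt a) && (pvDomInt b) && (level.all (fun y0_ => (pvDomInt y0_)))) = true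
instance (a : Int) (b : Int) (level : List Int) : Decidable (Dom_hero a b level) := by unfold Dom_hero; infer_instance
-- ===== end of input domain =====

-- B replaces A's O(n) cost scan inside the binary search by an O(log n) bisect on the
-- sorted list plus prefix sums; equivalence is about the RETURN value only (A sorts
-- `level` in place, B does not mutate it).

-- ===== PORT A =====
-- count = 0; for l in level: if l < mid: count += mid - l
def heroCount (level : List Int) (mid : Int) : Int :=
  level.foldl (fun c l => if l < mid then c + (mid - l) else c) 0

-- while left <= right: mid = (left+right)//2; …   (fuel is only a totality guard:
-- the interval shrinks every iteration, so (right+1-left).toNat+1 fuel never runs out)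
def heroLoop (b : Int) (level : List Int) (fuel : Nat) (left right : Int) : Int :=
  match fuel with
  | 0 => right
  | fuel + 1 =>
    if left ≤ right then
      if heroCount level (PySem.Int.floordiv (left + right) 2) ≤ b then
        heroLoop b level fuel (PySem.Int.floordiv (left + right) 2 + 1) right
      else
        heroLoop b level fuel left (PySem.Int.floordiv (left + right) 2 - 1)
    else right

def hero (a : Int) (b : Int) (level : List Int) : Int :=
  match PySem.List.sorted level (fun x => x) false with
  | [] => 0      -- level[0] raises IndexError here; excluded by Pre_hero
  | l0 :: t => heroLoop b (l0 :: t) ((l0 + b + 1 - l0).toNat + 1) l0 (l0 + b)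

-- ===== PORT B =====
-- inner binary search: lo, hi = 0, n; while lo < hi: …; indices are always in range
-- in every call B makes, so s[md] is ported as List.getD (exact there); fuel is only
-- a totality guard (hi-lo shrinks every iteration)
def altBisect (s : List Int) (m : Int) (fuel : Nat) (lo hi : Nat) : Nat :=
  match fuel with
  | 0 => lo
  | fuel + 1 =>
    if lo < hi then
      if s.getD ((lo + hi) / 2) 0 < m then altBisect s m fuel ((lo + hi) / 2 + 1) hi
      else altBisect s m fuel lo ((lo + hi) / 2)
    else lo

-- return m * lo - prefix[lo]
def altCost (s prefix_ : List Int) (n : Nat) (m : Int) : Int :=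
  m * (altBisect s m (n + 1) 0 n : Int) - prefix_.getD (altBisect s m (n + 1) 0 n) 0

def altLoop (b : Int) (s prefix_ : List Int) (n : Nat) (fuel : Nat) (left right : Int) : Int :=
  match fuel with
  | 0 => right
  | fuel + 1 =>
    if left ≤ right then
      if altCost s prefix_ n (PySem.Int.floordiv (left + right) 2) ≤ b then
        altLoop b s prefix_ n fuel (PySem.Int.floordiv (left + right) 2 + 1) right
      else
        altLoop b s prefix_ n fuel left (PySem.Int.floordiv (left + right) 2 - 1)
    else right

def hero_alt (a : Int) (b : Int) (level : List Int) : Int :=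
  let s := PySem.List.sorted level (fun x => x) false
  let n := s.length
  -- prefix = [0]; acc = 0; for x in s: acc += x; prefix.append(acc)
  let pa := s.foldl (fun (p : List Int × Int) x => (p.1 ++ [p.2 + x], p.2 + x)) ([0], 0)
  match s with
  | [] => 0      -- s[0] raises IndexError here; excluded by Pre_hero
  | l0 :: _ => altLoop b s pa.1 n ((l0 + b + 1 - l0).toNat + 1) l0 (l0 + b)

-- ===== PRECONDITION & SPEC =====
-- Pre_ excludes exactly the empty list, on which both A and B raise IndexError (level[0]).
def Pre_hero (a : Int) (b : Int) (level : List Int) : Prop := level ≠ []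
instance (a : Int) (b : Int) (level : List Int) : Decidable (Pre_hero a b level) := by unfold Pre_hero; infer_instance
def pvWitness_hero : Int × Int × List Int := (2, 5, [1, 3, 2])

def Spec_hero (a : Int) (b : Int) (level : List Int) (out : Int) : Prop := out = hero_alt a b level
instance (a : Int) (b : Int) (level : List Int) (out : Int) : Decidable (Spec_hero a b level out) := by unfold Spec_hero; infer_instance

-- ===== CLAIM (what is proved, stated in full; the proofs are below) =====
def Claim_equal_hero : Prop := ∀ (a : Int) (b : Int) (level : List Int), Dom_hero a b level → Pre_hero a b level → Spec_hero a b level (hero a b level)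

-- ===== LEMMAS AND PROOFS =====

-- heroCount as a mapped sum
theorem heroCount_eq_sum (level : List Int) (m : Int) :
    heroCount level m = (level.map (fun l => if l < m then m - l else 0)).sum := by
  unfold heroCount
  have h : ∀ (c : Int), level.foldl (fun c l => if l < m then c + (m - l) else c) c
      = c + (level.map (fun l => if l < m then m - l else 0)).sum := by
    induction level with
    | nil => intro c; simp
    | cons x t ih =>
      intro c
      simp only [List.foldl_cons, List.map_cons, List.sum_cons]
      rw [ih]
      split_ifs <;> ring
  simpa using h 0

-- heroCount is invariant under permutation of the list
theorem heroCount_perm (xs ys : List Int) (hp : xs.Perm ys) (m : Int) :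
    heroCount xs m = heroCount ys m := by
  rw [heroCount_eq_sum, heroCount_eq_sum]
  exact List.Perm.sum_eq (hp.map _)

-- the prefix-sum foldl builds scanl of (+)
theorem foldl_prefix_eq_scanl (s : List Int) (ps : List Int) (c : Int) :
    s.foldl (fun (p : List Int × Int) x => (p.1 ++ [p.2 + x], p.2 + x)) (ps, c)
      = (ps ++ (s.scanl (· + ·) c).tail, c + s.sum) := by
  induction s generalizing ps c with
  | nil => simp
  | cons x t ih =>
    simp only [List.foldl_cons, List.scanl_cons, List.sum_cons]
    rw [ih]
    simp only [List.tail_cons]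
    have hh : (c + x) :: (List.scanl (· + ·) (c + x) t).tail = List.scanl (· + ·) (c + x) t := by
      cases t <;> simp [List.scanl]
    rw [Prod.mk.injEq]
    constructor
    · rw [List.append_assoc, List.singleton_append, hh]
    · ring

theorem scanl_getD (s : List Int) (c : Int) (k : Nat) (hk : k ≤ s.length) :
    (s.scanl (· + ·) c).getD k 0 = c + (s.take k).sum := by
  induction s generalizing c k with
  | nil =>
    have : k = 0 := by simpa using hk
    subst this; simp [List.scanl]
  | cons x t ih =>
    cases k with
    | zero => simp
    | succ k =>
      simp only [List.scanl_cons, List.getD_cons_succ, List.take_succ_cons, List.sum_cons]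
      rw [ih (c + x) k (by simpa using hk)]
      ring

-- the bisect invariant: the returned index splits s into (< m) prefix and (≥ m) suffix
theorem altBisect_inv (s : List Int) (m : Int)
    (hmono : ∀ i j : Nat, i ≤ j → j < s.length → s.getD i 0 ≤ s.getD j 0) :
    ∀ fuel lo hi, hi - lo < fuel → lo ≤ hi → hi ≤ s.length →
    (∀ i, i < lo → s.getD i 0 < m) →
    (∀ i, hi ≤ i → i < s.length → m ≤ s.getD i 0) →
    altBisect s m fuel lo hi ≤ s.length ∧
    (∀ i, i < altBisect s m fuel lo hi → s.getD i 0 < m) ∧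
    (∀ i, altBisect s m fuel lo hi ≤ i → i < s.length → m ≤ s.getD i 0) := by
  intro fuel
  induction fuel with
  | zero => intro lo hi hN; omega
  | succ N ih =>
    intro lo hi hN hlh hhn h1 h2
    rw [altBisect]
    by_cases hlt : lo < hi
    · simp only [hlt, if_true]
      by_cases hm : s.getD ((lo + hi) / 2) 0 < m
      · simp only [hm, if_true]
        apply ih ((lo + hi) / 2 + 1) hi (by omega) (by omega) hhn
        · intro i hi'
          by_cases hil : i < lo
          · exact h1 i hil
          · exact lt_of_le_of_lt (hmono i ((lo + hi) / 2) (by omega) (by omega)) hm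
        · exact h2
      · simp only [hm, if_false]
        apply ih lo ((lo + hi) / 2) (by omega) (by omega) (by omega) h1
        intro i hi' hin
        exact le_trans (not_lt.mp hm) (hmono ((lo + hi) / 2) i hi' hin)
    · simp only [hlt, if_false]
      have : lo = hi := by omega
      exact ⟨by omega, fun i hi' => h1 i (by omega), by rw [this]; exact h2⟩

-- a (<m)/(≥m) split at index k determines the count-sum as m*k - sum(take k)
theorem sum_split (s : List Int) (m : Int) :
    ∀ k : Nat, k ≤ s.length →
    (∀ i, i < k → s.getD i 0 < m) →
    (∀ i, k ≤ i → i < s.length → m ≤ s.getD i 0) →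
    (s.map (fun l => if l < m then m - l else 0)).sum = m * (k : Int) - (s.take k).sum := by
  induction s with
  | nil =>
    intro k hk _ _
    have : k = 0 := by simpa using hk
    subst this; simp
  | cons x t ih =>
    intro k hk h1 h2
    cases k with
    | zero =>
      simp only [List.map_cons, List.sum_cons, List.take_zero, List.sum_nil, Nat.cast_zero]
      have hx : m ≤ x := by simpa using h2 0 (Nat.zero_le _) (by simp)
      have ht : (t.map (fun l => if l < m then m - l else 0)).sum = m * (0 : Int) - (t.take 0).sum := by
        apply ih 0 (Nat.zero_le _) (by omega)
        intro i _ hin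
        simpa using h2 (i + 1) (Nat.zero_le _) (by simpa using hin)
      simp only [List.take_zero, List.sum_nil] at ht
      rw [if_neg (not_lt.mpr hx), ht]
      ring
    | succ k =>
      simp only [List.map_cons, List.sum_cons, List.take_succ_cons, List.sum_cons]
      have hx : x < m := by simpa using h1 0 (Nat.succ_pos _)
      have ht : (t.map (fun l => if l < m then m - l else 0)).sum = m * (k : Int) - (t.take k).sum := by
        apply ih k (by simpa using hk)
        · intro i hik; simpa using h1 (i + 1) (by omega)
        · intro i hik hin; simpa using h2 (i + 1) (by omega) (by simpa using hin)
      rw [if_pos hx, ht]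
      push_cast
      ring

-- sorted lists are index-monotone
theorem sorted_getD_mono (level : List Int) :
    ∀ i j : Nat, i ≤ j → j < (PySem.List.sorted level (fun x => x) false).length →
    (PySem.List.sorted level (fun x => x) false).getD i 0 ≤ (PySem.List.sorted level (fun x => x) false).getD j 0 := by
  intro i j hij hj
  have hi : i < (PySem.List.sorted level (fun x => x) false).length := lt_of_le_of_lt hij hj
  have := PySem.List.sorted_id_getElem_mono (xs := level) (p := i) (q := j) hij hj
  rw [List.getD_eq_getElem _ _ hi, List.getD_eq_getElem _ _ hj]
  exact this

-- altCost equals heroCount on the sorted list (with the right prefix list)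
theorem altCost_eq_heroCount (level : List Int) (m : Int) :
    altCost (PySem.List.sorted level (fun x => x) false)
      ((PySem.List.sorted level (fun x => x) false).foldl
        (fun (p : List Int × Int) x => (p.1 ++ [p.2 + x], p.2 + x)) ([0], 0)).1
      (PySem.List.sorted level (fun x => x) false).length m
    = heroCount level m := by
  set s := PySem.List.sorted level (fun x => x) false with hs
  obtain ⟨hk1, hk2, hk3⟩ := altBisect_inv s m (sorted_getD_mono level) (s.length + 1) 0 s.length
    (by omega) (Nat.zero_le _) le_rfl (by omega) (by omega)
  have hperm : heroCount level m = heroCount s m :=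
    (heroCount_perm s level (PySem.List.sorted_perm level (fun x => x) false) m).symm
  rw [hperm, heroCount_eq_sum]
  rw [sum_split s m (altBisect s m (s.length + 1) 0 s.length) hk1 hk2 hk3]
  unfold altCost
  congr 1
  rw [foldl_prefix_eq_scanl]
  have h0 : ([0] : List Int) ++ (s.scanl (· + ·) 0).tail = s.scanl (· + ·) 0 := by
    cases s <;> simp
  rw [h0, scanl_getD s 0 _ hk1]
  ring

-- the two outer binary searches agree step by step (same fuel, same interval)
theorem loop_eq (b : Int) (level : List Int) :
    ∀ fuel left right,
    heroLoop b (PySem.List.sorted level (fun x => x) false) fuel left right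
      = altLoop b (PySem.List.sorted level (fun x => x) false)
          ((PySem.List.sorted level (fun x => x) false).foldl
            (fun (p : List Int × Int) x => (p.1 ++ [p.2 + x], p.2 + x)) ([0], 0)).1
          (PySem.List.sorted level (fun x => x) false).length fuel left right := by
  intro fuel
  induction fuel with
  | zero => intro left right; rfl
  | succ N ih =>
    intro left right
    rw [heroLoop, altLoop]
    by_cases h : left ≤ right
    · simp only [h, if_true]
      rw [heroCount_perm (PySem.List.sorted level (fun x => x) false) level
            (PySem.List.sorted_perm level (fun x => x) false),
        ← altCost_eq_heroCount level]
      split_ifs with hc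
      · exact ih _ _
      · exact ih _ _
    · simp [h]

-- ===== VERDICT (by name: the statement is the Claim_ definition above) =====
theorem hero_spec : Claim_equal_hero := by
  intro a b level _ hpre
  unfold Spec_hero hero hero_alt
  have hne : PySem.List.sorted level (fun x => x) false ≠ [] := by
    intro hnil
    have hp := PySem.List.sorted_perm level (fun x => x) false
    rw [hnil] at hp
    exact hpre hp.symm.eq_nil
  cases hsv : PySem.List.sorted level (fun x => x) false with
  | nil => exact absurd hsv hne
  | cons l0 t =>
    simp only
    have := loop_eq b level ((l0 + b + 1 - l0).toNat + 1) l0 (l0 + b)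
    rw [hsv] at this
    exact this
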